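-- pv_equiv track=rewrite | github.com/soyIagoParis/mini-ATS-helper | main.py | get_duplicates_and_count
-- ===== SOURCE A (Python) =====
-- def get_duplicates_and_count(list):
--     seen = set()
--     duplicates = {}
--
--     for item in list:
--         if item in seen:
--             if item in duplicates:
--                 duplicates[item] += 1
--             else:
--                 duplicates[item] = 2
--         else:
--             seen.add(item)
--
--
--     # Sort dictionary by descending duplicate count
--     sorted_duplicates = sorted(duplicates.items(), key=lambda key_value_pair: key_value_pair[1], reverse=True)
--     # Output is a list so reconvert to dict
--     return dict(sorted_duplicates)
-- ===== SOURCE B (Python) =====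
-- def get_duplicates_and_count(list):
--     # An item is a duplicate exactly at its second occurrence: when the prefix
--     # before it already contains it once.  Collect items in second-occurrence
--     # order by brute-force prefix counting, attach each one's total count, then
--     # sort by count descending (stable, so second-occurrence order breaks ties).
--     dups = [item for i, item in enumerate(list) if list[:i].count(item) == 1]
--     pairs = sorted(((item, list.count(item)) for item in dups),
--                    key=lambda pair: pair[1], reverse=True)
--     return dict(pairs)
-- ===== Notes on version B (the rewrite author's own statement) =====
-- stated objective: alternative
-- what changed: B drops A's seen-set/duplicates-dict accumulator entirely: it selects each item at its second occurrence by brute-force prefix counting (list[:i].count(item) == 1) in a comprehension, pairs each with its global list.count, then sorts by count descending; it trades A's O(n) hash pass for O(n^2) direct counting with no mutable state.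
import Mathlib
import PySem

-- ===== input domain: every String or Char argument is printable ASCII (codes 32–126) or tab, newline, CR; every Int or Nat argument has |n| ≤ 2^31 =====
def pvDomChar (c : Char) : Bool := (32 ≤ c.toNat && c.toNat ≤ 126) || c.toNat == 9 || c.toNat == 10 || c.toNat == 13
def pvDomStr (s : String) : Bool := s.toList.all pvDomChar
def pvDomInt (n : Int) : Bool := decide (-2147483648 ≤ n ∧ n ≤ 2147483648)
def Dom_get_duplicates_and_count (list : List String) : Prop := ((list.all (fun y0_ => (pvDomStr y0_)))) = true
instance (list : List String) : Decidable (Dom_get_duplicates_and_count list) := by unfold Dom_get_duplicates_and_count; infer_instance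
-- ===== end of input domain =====

-- B replaces A's seen-set / duplicates-dict pass by a stateless comprehension
-- (an item is a duplicate exactly at its second occurrence, detected by prefix
-- counting) paired with global counts, then a sort — no accumulator at all.

-- ===== PORT A =====
-- loop body of A's 'for item in list' (state: (seen, duplicates))
def pvStepA (st : PySem.Set String × PySem.Dict String Int) (item : String) :
    PySem.Set String × PySem.Dict String Int :=
  if PySem.Set.contains st.1 item then
    if st.2.contains item then
      (st.1, st.2.insert item (st.2.getD item 0 + 1))   -- duplicates[item] += 1
    else
      (st.1, st.2.insert item 2)                         -- duplicates[item] = 2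
  else
    (PySem.Set.add st.1 item, st.2)                      -- seen.add(item)

def get_duplicates_and_count (list : List String) : List (String × Int) :=
  let st := list.foldl pvStepA (PySem.Set.empty, PySem.Dict.empty)
  let sorted_duplicates := PySem.List.sorted st.2.items (fun p => p.2) true
  (PySem.Dict.ofList sorted_duplicates).items

-- ===== PORT B =====
-- B's comprehension: [item for i, item in enumerate(list) if list[:i].count(item) == 1]
def pvDups (list : List String) : List String :=
  ((PySem.List.enumerate list).filter
    (fun p => PySem.List.count (PySem.List.slice list none (some p.1)) p.2 == 1)).map
    (fun p => p.2)

def get_duplicates_and_count_alt (list : List String) : List (String × Int) :=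
  let pairs := PySem.List.sorted
      ((pvDups list).map (fun item => (item, (PySem.List.count list item : Int))))
      (fun pair => pair.2) true
  (PySem.Dict.ofList pairs).items

-- ===== PRECONDITION & SPEC =====
def Spec_get_duplicates_and_count (list : List String) (out : List (String × Int)) : Prop := out = get_duplicates_and_count_alt list
instance (list : List String) (out : List (String × Int)) : Decidable (Spec_get_duplicates_and_count list out) := by unfold Spec_get_duplicates_and_count; infer_instance

-- ===== CLAIM (what is proved, stated in full; the proofs are below) =====
def Claim_equal_get_duplicates_and_count : Prop := ∀ (list : List String), Dom_get_duplicates_and_count list → Spec_get_duplicates_and_count list (get_duplicates_and_count list)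

-- ===== LEMMAS AND PROOFS =====

-- how B's comprehension grows when one element is appended
theorem pvDups_append (xs : List String) (x : String) :
    pvDups (xs ++ [x]) = pvDups xs ++ (if xs.count x = 1 then [x] else []) := by
  unfold pvDups
  rw [PySem.List.enumerate_append, List.filter_append, List.map_append]
  congr 1
  · -- old entries: the prefix slice does not see the appended element
    refine congrArg _ (List.filter_congr ?_)
    intro p hp
    obtain ⟨k, hk, rfl⟩ := (PySem.List.mem_enumerate_iff xs 0 p).mp hp
    simp only [zero_add, PySem.List.slice_to_natCast,
      List.take_append_of_le_length (Nat.le_of_lt hk)]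
  · -- the new entry (xs.length, x): its prefix slice is exactly xs
    simp only [PySem.List.enumerate, List.filter_cons, List.filter_nil,
      PySem.List.slice_to_natCast, zero_add, List.take_left']
    rw [PySem.List.count_eq]
    by_cases h : xs.count x = 1 <;> simp [h]

-- joint invariant: A's seen is set(xs); A's duplicates.items equals B's
-- comprehension paired with the counts; the comprehension holds exactly the
-- elements occurring ≥ 2 times, without repetition.
theorem pv_loop_inv (xs : List String) :
    (xs.foldl pvStepA (PySem.Set.empty, PySem.Dict.empty)).1 = PySem.Set.ofList xs
    ∧ (xs.foldl pvStepA (PySem.Set.empty, PySem.Dict.empty)).2.items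
        = (pvDups xs).map (fun k => (k, (xs.count k : Int)))
    ∧ (∀ k, k ∈ pvDups xs ↔ 2 ≤ xs.count k)
    ∧ (pvDups xs).Nodup := by
  induction xs using List.reverseRecOn with
  | nil =>
    refine ⟨rfl, rfl, ?_, ?_⟩ <;> simp [pvDups, PySem.List.enumerate]
  | append_singleton xs x ih =>
    obtain ⟨h1, h3, h4, h5⟩ := ih
    set A := xs.foldl pvStepA (PySem.Set.empty, PySem.Dict.empty) with hA
    simp only [List.foldl_append, List.foldl_cons, List.foldl_nil, ← hA]
    have hkeys : A.2.keys = pvDups xs := by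
      show A.2.items.map (·.1) = pvDups xs
      rw [h3, List.map_map]; simp [Function.comp_def]
    have hcount : ∀ k, (xs ++ [x]).count k = xs.count k + if x = k then 1 else 0 := by
      intro k; simp [List.count_append, List.count_singleton]
    by_cases hx : x ∈ xs
    · have hcA : PySem.Set.contains A.1 x = true := by
        rw [h1, PySem.Set.contains_iff, PySem.Set.mem_ofList]; exact hx
      by_cases hd : 2 ≤ xs.count x
      · -- x already a known duplicate: B's comprehension does not grow
        have hdup : pvDups (xs ++ [x]) = pvDups xs := by
          rw [pvDups_append]; simp only [show ¬ xs.count x = 1 by omega, if_false,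
            List.append_nil]
        have hxB : x ∈ pvDups xs := (h4 x).mpr hd
        have hcD : A.2.contains x = true := by
          rw [PySem.Dict.contains_iff_mem_keys, hkeys]; exact hxB
        have hnodupk : A.2.keys.Nodup := by rw [hkeys]; exact h5
        have hmemit : (x, (xs.count x : Int)) ∈ A.2.items := by
          rw [h3]; exact List.mem_map_of_mem hxB
        have hgA : A.2.getD x 0 = (xs.count x : Int) :=
          PySem.Dict.getD_of_mem_items A.2 hmemit hnodupk 0
        simp only [pvStepA, hcA, hcD, if_true]
        refine ⟨by rw [h1, PySem.Set.ofList_append_singleton,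
            PySem.Set.add_of_mem ((PySem.Set.mem_ofList xs x).mpr hx)], ?_, ?_, ?_⟩
        · rw [PySem.Dict.items_insert_of_contains A.2 _ hcD, h3, List.map_map, hdup]
          refine List.map_congr_left ?_
          intro k hk
          rw [hcount k]
          by_cases hkx : k = x
          · subst hkx; simp [hgA]
          · simp [hkx, Ne.symm hkx]
        · intro k
          rw [hdup, hcount k, h4 k]
          by_cases hkx : x = k
          · subst hkx; constructor <;> intro _ <;> omega
          · simp [hkx]
        · rw [hdup]; exact h5
      · -- second occurrence right now: xs.count x = 1, the comprehension grows
        have hc1 : xs.count x = 1 := by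
          have := List.count_pos_iff.mpr hx; omega
        have hdup : pvDups (xs ++ [x]) = pvDups xs ++ [x] := by
          rw [pvDups_append, hc1]; simp
        have hxB : x ∉ pvDups xs := fun h => hd ((h4 x).mp h)
        have hcD : A.2.contains x = false := by
          rw [← Bool.not_eq_true, PySem.Dict.contains_iff_mem_keys, hkeys]; exact hxB
        simp only [pvStepA, hcA, hcD, if_true, Bool.false_eq_true, if_false]
        refine ⟨by rw [h1, PySem.Set.ofList_append_singleton,
            PySem.Set.add_of_mem ((PySem.Set.mem_ofList xs x).mpr hx)], ?_, ?_, ?_⟩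
        · rw [PySem.Dict.items_insert_of_not_contains A.2 _ hcD, h3, hdup,
            List.map_append]
          congr 1
          · refine List.map_congr_left ?_
            intro k hk
            have hkx : x ≠ k := fun h => hxB (h ▸ hk)
            rw [hcount k]; simp [hkx]
          · simp [hc1]
        · intro k
          rw [hdup, hcount k, List.mem_append, h4 k, List.mem_singleton]
          by_cases hkx : x = k
          · subst hkx; simp [hc1]
          · simp [hkx, Ne.symm hkx]
        · rw [hdup]
          exact h5.append (List.nodup_singleton x)
            (by rw [List.disjoint_singleton]; exact hxB)
    · -- first occurrence of x
      have hc0 : xs.count x = 0 := List.count_eq_zero.mpr hx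
      have hdup : pvDups (xs ++ [x]) = pvDups xs := by
        rw [pvDups_append, hc0]; simp
      have hcA : PySem.Set.contains A.1 x = false := by
        rw [← Bool.not_eq_true, h1, PySem.Set.contains_iff, PySem.Set.mem_ofList]; exact hx
      simp only [pvStepA, hcA, Bool.false_eq_true, if_false]
      refine ⟨?_, ?_, ?_, ?_⟩
      · rw [h1, PySem.Set.ofList_append_singleton]
      · rw [h3, hdup]
        refine List.map_congr_left ?_
        intro k hk
        have hkmem : k ∈ xs := by
          have := (h4 k).mp hk; exact List.count_pos_iff.mp (by omega)
        have hkx : x ≠ k := fun h => hx (h ▸ hkmem)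
        rw [hcount k]; simp [hkx]
      · intro k
        rw [hdup, hcount k, h4 k]
        by_cases hkx : x = k
        · subst hkx; simp [hc0]
        · simp [hkx]
      · rw [hdup]; exact h5

-- ===== VERDICT (by name: the statement is the Claim_ definition above) =====
theorem get_duplicates_and_count_spec : Claim_equal_get_duplicates_and_count := by
  intro list _
  unfold Spec_get_duplicates_and_count get_duplicates_and_count get_duplicates_and_count_alt
  obtain ⟨h1, h3, h4, h5⟩ := pv_loop_inv list
  simp only [h3, PySem.List.count_eq]
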